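-- pv_equiv track=rewrite | github.com/SalahNassar0/Asset-Tag-Tracker | app.py | generate_asset_tag
-- ===== SOURCE A (Python) =====
-- def generate_asset_tag(country_code, manufacturer_code, assets):
--     """Generate next sequential asset tag"""
--     # Find existing assets with same country and manufacturer
--     existing_assets = [asset for asset in assets
--                       if asset.get('country_code') == country_code
--                       and asset.get('manufacturer_code') == manufacturer_code]
--
--     if not existing_assets:
--         next_number = 1
--     else:
--         # Extract numbers from existing tags
--         numbers = []
--         for asset in existing_assets:
--             tag = asset.get('tag', '')
--             if '-' in tag:
--                 try:
--                     number = int(tag.split('-')[-1])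
--                     numbers.append(number)
--                 except:
--                     pass
--
--         next_number = max(numbers) + 1 if numbers else 1
--
--     return f"{country_code}-{manufacturer_code}-{next_number:04d}"
-- ===== SOURCE B (Python) =====
-- def generate_asset_tag(country_code, manufacturer_code, assets):
--     """Generate next sequential asset tag (per-group max index built over all assets)"""
--     group_max = {}
--     for asset in assets:
--         tag = asset.get('tag', '')
--         if '-' not in tag:
--             continue
--         try:
--             n = int(tag.split('-')[-1])
--         except ValueError:
--             continue
--         key = (asset.get('country_code'), asset.get('manufacturer_code'))
--         prev = group_max.get(key)
--         group_max[key] = n if prev is None else max(prev, n)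
--     m = group_max.get((country_code, manufacturer_code))
--     next_number = 1 if m is None else m + 1
--     return f"{country_code}-{manufacturer_code}-{next_number:04d}"
-- ===== Notes on version B (the rewrite author's own statement) =====
-- stated objective: alternative
-- what changed: Instead of A's filter-by-group then collect-then-max pipeline, B never filters: it makes one pass over all assets building a hash index mapping each (country_code, manufacturer_code) group to its maximum trailing tag number, and then answers with a single dictionary lookup of the requested group.
import Mathlib
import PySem

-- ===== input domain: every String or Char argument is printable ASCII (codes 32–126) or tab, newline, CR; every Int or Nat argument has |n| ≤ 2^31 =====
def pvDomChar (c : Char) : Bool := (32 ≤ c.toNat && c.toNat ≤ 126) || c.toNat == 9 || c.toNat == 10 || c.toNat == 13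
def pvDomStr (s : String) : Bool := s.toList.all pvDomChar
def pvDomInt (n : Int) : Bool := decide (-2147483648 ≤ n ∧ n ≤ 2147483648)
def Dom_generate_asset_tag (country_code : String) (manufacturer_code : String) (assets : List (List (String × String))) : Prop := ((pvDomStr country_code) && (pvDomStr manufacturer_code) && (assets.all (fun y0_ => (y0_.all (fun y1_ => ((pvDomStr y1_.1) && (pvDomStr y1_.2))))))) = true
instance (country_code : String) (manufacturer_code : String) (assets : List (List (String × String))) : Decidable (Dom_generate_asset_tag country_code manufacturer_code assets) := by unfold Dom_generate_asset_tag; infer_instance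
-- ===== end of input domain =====

-- B replaces A's filter-then-collect-then-max pipeline by a hash index: one pass over ALL assets
-- building a dict (country_code, manufacturer_code) → max trailing tag number, then one lookup
-- (objective: alternative; same asymptotic cost).

-- ===== PORT A =====
def generate_asset_tag (country_code : String) (manufacturer_code : String) (assets : List (List (String × String))) : String :=
  let existing_assets := assets.filter (fun asset =>
    (PySem.Dict.mk asset).get? "country_code" == some country_code &&
    (PySem.Dict.mk asset).get? "manufacturer_code" == some manufacturer_code)
  let next_number : Int :=
    if existing_assets.isEmpty then 1
    else
      let numbers := existing_assets.foldl (fun numbers asset =>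
        let tag := (PySem.Dict.mk asset).getD "tag" ""
        if PySem.Str.isIn "-" tag then
          -- tag.split('-')[-1]: split never returns an empty list, so [-1] cannot raise (pyGetD's default is unreachable)
          match PySem.Int.ofChars? (PySem.List.pyGetD (PySem.Chars.splitOn tag.toList ['-']) (-1) []) with
          | some number => numbers ++ [number]
          | none => numbers          -- except: pass
        else numbers) ([] : List Int)
      if numbers.isEmpty then 1
      else (PySem.List.max? numbers (fun x => x)).getD 0 + 1   -- numbers ≠ [], so max? is some and the default 0 is unreachable
  -- f"...{n:04d}": format(n, '04d') = str(n).zfill(4) for every int (the sign stays in front in both)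
  country_code ++ "-" ++ manufacturer_code ++ "-" ++ PySem.Str.zfill (PySem.Int.toStr next_number) 4

-- ===== PORT B =====
def generate_asset_tag_alt (country_code : String) (manufacturer_code : String) (assets : List (List (String × String))) : String :=
  let group_max := assets.foldl (fun gm asset =>
    let tag := (PySem.Dict.mk asset).getD "tag" ""
    if !(PySem.Str.isIn "-" tag) then gm
    else
      match PySem.Int.ofChars? (PySem.List.pyGetD (PySem.Chars.splitOn tag.toList ['-']) (-1) []) with
      | none => gm                   -- except ValueError: continue
      | some n =>
        let key := ((PySem.Dict.mk asset).get? "country_code", (PySem.Dict.mk asset).get? "manufacturer_code")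
        match gm.get? key with
        | none => gm.insert key n
        | some prev => gm.insert key (max prev n))
    (PySem.Dict.empty : PySem.Dict (Option String × Option String) Int)
  let next_number : Int :=
    match group_max.get? (some country_code, some manufacturer_code) with
    | none => 1
    | some m => m + 1
  country_code ++ "-" ++ manufacturer_code ++ "-" ++ PySem.Str.zfill (PySem.Int.toStr next_number) 4

-- ===== PRECONDITION & SPEC =====
def Spec_generate_asset_tag (country_code : String) (manufacturer_code : String) (assets : List (List (String × String))) (out : String) : Prop := out = generate_asset_tag_alt country_code manufacturer_code assets
instance (country_code : String) (manufacturer_code : String) (assets : List (List (String × String))) (out : String) : Decidable (Spec_generate_asset_tag country_code manufacturer_code assets out) := by unfold Spec_generate_asset_tag; infer_instance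

-- ===== CLAIM (what is proved, stated in full; the proofs are below) =====
def Claim_equal_generate_asset_tag : Prop := ∀ (country_code : String) (manufacturer_code : String) (assets : List (List (String × String))), Dom_generate_asset_tag country_code manufacturer_code assets → Spec_generate_asset_tag country_code manufacturer_code assets (generate_asset_tag country_code manufacturer_code assets)

-- ===== LEMMAS AND PROOFS =====

-- the group key B indexes an asset under
def pvKey (asset : List (String × String)) : Option String × Option String :=
  ((PySem.Dict.mk asset).get? "country_code", (PySem.Dict.mk asset).get? "manufacturer_code")

-- the matching test A applies to an asset
def pvMatch (cc mc : String) (asset : List (String × String)) : Bool :=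
  (PySem.Dict.mk asset).get? "country_code" == some cc &&
  (PySem.Dict.mk asset).get? "manufacturer_code" == some mc

-- the optional trailing number an asset's tag contributes
def pvNum (asset : List (String × String)) : Option Int :=
  let tag := (PySem.Dict.mk asset).getD "tag" ""
  if PySem.Str.isIn "-" tag then
    PySem.Int.ofChars? (PySem.List.pyGetD (PySem.Chars.splitOn tag.toList ['-']) (-1) [])
  else none

-- the numbers of a given group, in order
def pvNumsK (K : Option String × Option String) (assets : List (List (String × String))) : List Int :=
  (assets.filter (fun a => pvKey a == K)).flatMap (fun a => (pvNum a).toList)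

def pvOptStep (b : Option Int) (n : Int) : Option Int :=
  some (match b with | some x => max x n | none => n)

theorem pvMatch_eq_key (cc mc : String) (a : List (String × String)) :
    pvMatch cc mc a = (pvKey a == (some cc, some mc)) := by
  simp only [pvMatch, pvKey]
  cases h1 : ((PySem.Dict.mk a).get? "country_code" == some cc) <;>
    cases h2 : ((PySem.Dict.mk a).get? "manufacturer_code" == some mc) <;>
      simp_all [Prod.ext_iff]

theorem pvStepA (acc : List Int) (a : List (String × String)) :
    (let tag := (PySem.Dict.mk a).getD "tag" ""
     if PySem.Str.isIn "-" tag then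
       match PySem.Int.ofChars? (PySem.List.pyGetD (PySem.Chars.splitOn tag.toList ['-']) (-1) []) with
       | some number => acc ++ [number]
       | none => acc
     else acc) = acc ++ (pvNum a).toList := by
  simp only [pvNum]
  split
  · cases PySem.Int.ofChars? (PySem.List.pyGetD
      (PySem.Chars.splitOn ((PySem.Dict.mk a).getD "tag" "").toList ['-']) (-1) []) <;> simp
  · simp

theorem pvA_numbers (cc mc : String) (l : List (List (String × String))) (acc : List Int) :
    (l.filter (pvMatch cc mc)).foldl (fun numbers asset =>
        let tag := (PySem.Dict.mk asset).getD "tag" ""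
        if PySem.Str.isIn "-" tag then
          match PySem.Int.ofChars? (PySem.List.pyGetD (PySem.Chars.splitOn tag.toList ['-']) (-1) []) with
          | some number => numbers ++ [number]
          | none => numbers
        else numbers) acc
      = acc ++ pvNumsK (some cc, some mc) l := by
  rw [show pvMatch cc mc = (fun a => pvKey a == (some cc, some mc)) from funext (pvMatch_eq_key cc mc),
      PySem.List.foldl_congr_mem _ _
        (fun numbers a => numbers ++ (pvNum a).toList) acc (fun acc' x _ => pvStepA acc' x),
      PySem.List.foldl_append_eq_flatMap]
  rfl

-- B's step rewritten through pvKey/pvNum/pvOptStep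
theorem pvStepB (gm : PySem.Dict (Option String × Option String) Int) (a : List (String × String)) :
    (let tag := (PySem.Dict.mk a).getD "tag" ""
     if !(PySem.Str.isIn "-" tag) then gm
     else
       match PySem.Int.ofChars? (PySem.List.pyGetD (PySem.Chars.splitOn tag.toList ['-']) (-1) []) with
       | none => gm
       | some n =>
         let key := ((PySem.Dict.mk a).get? "country_code", (PySem.Dict.mk a).get? "manufacturer_code")
         match gm.get? key with
         | none => gm.insert key n
         | some prev => gm.insert key (max prev n))
    = (pvNum a).elim gm (fun n => gm.insert (pvKey a) ((pvOptStep (gm.get? (pvKey a)) n).getD 0)) := by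
  simp only [pvNum, pvKey, pvOptStep]
  cases ht : PySem.Str.isIn "-" ((PySem.Dict.mk a).getD "tag" "") <;>
    simp only [Bool.not_true, Bool.not_false, if_true, if_false,
      Bool.false_eq_true, Option.elim_none]
  cases PySem.Int.ofChars? (PySem.List.pyGetD
      (PySem.Chars.splitOn ((PySem.Dict.mk a).getD "tag" "").toList ['-']) (-1) []) with
  | none => rfl
  | some n =>
    cases gm.get? ((PySem.Dict.mk a).get? "country_code", (PySem.Dict.mk a).get? "manufacturer_code") <;> rfl

-- invariant: the fold's value at any key K is the fold of that group's numbers over the start value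
theorem pvB_invariant (l : List (List (String × String))) (K : Option String × Option String) :
    ∀ gm : PySem.Dict (Option String × Option String) Int,
    (l.foldl (fun gm asset =>
      let tag := (PySem.Dict.mk asset).getD "tag" ""
      if !(PySem.Str.isIn "-" tag) then gm
      else
        match PySem.Int.ofChars? (PySem.List.pyGetD (PySem.Chars.splitOn tag.toList ['-']) (-1) []) with
        | none => gm
        | some n =>
          let key := ((PySem.Dict.mk asset).get? "country_code", (PySem.Dict.mk asset).get? "manufacturer_code")
          match gm.get? key with
          | none => gm.insert key n
          | some prev => gm.insert key (max prev n)) gm).get? K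
    = (pvNumsK K l).foldl pvOptStep (gm.get? K) := by
  induction l with
  | nil => intro gm; simp [pvNumsK]
  | cons a t ih =>
    intro gm
    rw [List.foldl_cons, pvStepB gm a]
    cases hn : pvNum a with
    | none =>
      have : pvNumsK K (a :: t) = pvNumsK K t := by
        simp only [pvNumsK, List.filter_cons]
        split
        · simp [hn]
        · rfl
      simp only [Option.elim_none, ih gm, this]
    | some n =>
      by_cases hk : pvKey a = K
      · have hb : (pvKey a == K) = true := by simp [hk]
        have hnums : pvNumsK K (a :: t) = n :: pvNumsK K t := by
          simp [pvNumsK, hb, hn]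
        rw [Option.elim_some, ih, hnums, List.foldl_cons]
        congr 1
        rw [hk, PySem.Dict.get?_insert_self]
        cases gm.get? K <;> simp [pvOptStep]
      · have hb : (pvKey a == K) = false := by simp [hk]
        have hnums : pvNumsK K (a :: t) = pvNumsK K t := by
          simp [pvNumsK, hb]
        rw [Option.elim_some, ih, hnums, PySem.Dict.get?_insert, if_neg (fun h => hk h.symm)]

theorem pvOptMax (t : List Int) : ∀ n : Int,
    t.foldl pvOptStep (some n) = some (t.foldl max n) := by
  induction t with
  | nil => intro n; rfl
  | cons m t ih => intro n; simpa [pvOptStep] using ih (max n m)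

theorem generate_asset_tag_eq (cc mc : String) (assets : List (List (String × String))) :
    generate_asset_tag cc mc assets = generate_asset_tag_alt cc mc assets := by
  simp only [generate_asset_tag, generate_asset_tag_alt]
  rw [show (fun asset => (PySem.Dict.mk asset).get? "country_code" == some cc &&
        (PySem.Dict.mk asset).get? "manufacturer_code" == some mc) = pvMatch cc mc from rfl]
  rw [pvA_numbers cc mc assets, pvB_invariant assets (some cc, some mc) PySem.Dict.empty]
  simp only [List.nil_append, PySem.Dict.get?_empty]
  cases h : pvNumsK (some cc, some mc) assets with
  | nil =>
    cases he : (assets.filter (pvMatch cc mc)).isEmpty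
    · simp [he]
    · simp
  | cons n t =>
    have hne : (assets.filter (pvMatch cc mc)).isEmpty = false := by
      by_contra hc
      have h0 : (assets.filter (pvMatch cc mc)).isEmpty = true := by
        cases hE : (assets.filter (pvMatch cc mc)).isEmpty; exact absurd hE hc; rfl
      rw [List.isEmpty_iff] at h0
      have : pvNumsK (some cc, some mc) assets = [] := by
        simp only [pvNumsK]
        rw [show (fun a => pvKey a == (some cc, some mc)) = pvMatch cc mc from
          (funext (pvMatch_eq_key cc mc)).symm, h0]
        rfl
      simp [this] at h
    simp only [hne, Bool.false_eq_true, if_false, List.isEmpty_cons,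
      PySem.List.max?_id_cons, Option.getD_some, List.foldl_cons]
    simp [pvOptStep, pvOptMax]

-- ===== VERDICT (by name: the statement is the Claim_ definition above) =====
theorem generate_asset_tag_spec : Claim_equal_generate_asset_tag := by
  intro cc mc assets _
  unfold Spec_generate_asset_tag
  exact generate_asset_tag_eq cc mc assets
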